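-- pv_equiv track=rewrite | github.com/edsontm/vllm_manager | backend/app/services/vllm_service.py | _select_preferred_gguf_filename
-- ===== SOURCE A (Python) =====
-- def _select_preferred_gguf_filename(files: list[str]) -> str | None:
--     if not files:
--         return None
--
--     # Prefer practical defaults first to reduce OOM risk on common single-GPU setups.
--     preferred_markers = (
--         "q4_k_m",
--         "q5_k_m",
--         "q4_k_s",
--         "q5_k_s",
--         "q6_k",
--         "q8_0",
--         "f16",
--         "bf16",
--     )
--
--     lowered = [(name, name.lower()) for name in files]
--     for marker in preferred_markers:
--         for original, candidate in lowered:
--             if marker in candidate: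
--                 return original
--
--     # Fallback: deterministic order.
--     return sorted(files)[0]
-- ===== SOURCE B (Python) =====
-- def _select_preferred_gguf_filename(files: list[str]) -> str | None:
--     if not files:
--         return None
--
--     preferred_markers = (
--         "q4_k_m",
--         "q5_k_m",
--         "q4_k_s",
--         "q5_k_s",
--         "q6_k",
--         "q8_0",
--         "f16",
--         "bf16",
--     )
--
--     def rank(name: str) -> int:
--         low = name.lower()
--         for i, marker in enumerate(preferred_markers):
--             if marker in low:
--                 return i
--         return len(preferred_markers)
--
--     best_name, best_rank = files[0], rank(files[0])
--     for name in files[1:]: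
--         r = rank(name)
--         if r < best_rank:
--             best_name, best_rank = name, r
--
--     if best_rank < len(preferred_markers):
--         return best_name
--     return sorted(files)[0]
-- ===== Notes on version B (the rewrite author's own statement) =====
-- stated objective: alternative
-- what changed: Replaces the marker-major nested scan (for each marker, rescan the whole file list) by a single file-major pass that assigns each file the index of the first marker its lowered name contains and keeps the first file with the minimal rank, with the same sorted(files)[0] fallback when nothing matches.
import Mathlib
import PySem

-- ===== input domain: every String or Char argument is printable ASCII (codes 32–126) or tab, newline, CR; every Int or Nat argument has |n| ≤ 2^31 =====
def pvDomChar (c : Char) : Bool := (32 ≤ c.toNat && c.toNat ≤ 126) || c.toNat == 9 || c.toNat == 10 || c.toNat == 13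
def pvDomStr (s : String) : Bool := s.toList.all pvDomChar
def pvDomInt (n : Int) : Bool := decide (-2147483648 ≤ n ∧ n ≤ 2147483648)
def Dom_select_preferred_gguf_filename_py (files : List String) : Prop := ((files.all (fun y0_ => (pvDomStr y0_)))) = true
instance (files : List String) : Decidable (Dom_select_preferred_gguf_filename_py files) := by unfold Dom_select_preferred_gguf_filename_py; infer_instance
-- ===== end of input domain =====

-- B replaces A's marker-major nested scan by a single file-major pass keeping the first
-- file of minimal marker rank (alternative decomposition, same cost; same sorted fallback).

-- ===== PORT A =====
-- the preferred_markers tuple, shared verbatim by both Pythons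
def pvMarkers : List String := ["q4_k_m", "q5_k_m", "q4_k_s", "q5_k_s", "q6_k", "q8_0", "f16", "bf16"]

-- A's inner 'for original, candidate in lowered' loop as find?, outer 'for marker' loop as recursion
def pvAOuter : List String → List (String × String) → Option String
  | [], _ => none
  | m :: ms, lowered =>
    match lowered.find? (fun p => PySem.Str.isIn m p.2) with
    | some p => some p.1
    | none => pvAOuter ms lowered

def select_preferred_gguf_filename_py (files : List String) : Option String :=
  if files = [] then none
  else
    let lowered := files.map (fun name => (name, PySem.Str.lower name))
    match pvAOuter pvMarkers lowered with
    | some original => some original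
    | none => PySem.List.pyGet? (PySem.List.sorted files (fun x => x) false) 0

-- ===== PORT B =====
-- B's rank helper: index of the first marker contained in the lowered name, len(markers) if none
def pvRank (name : String) : Nat :=
  pvMarkers.findIdx (fun m => PySem.Str.isIn m (PySem.Str.lower name))

def select_preferred_gguf_filename_py_alt (files : List String) : Option String :=
  match files with
  | [] => none
  | f0 :: rest =>
    let best := rest.foldl
      (fun acc name =>
        let r := pvRank name
        if r < acc.2 then (name, r) else acc)
      (f0, pvRank f0)
    if best.2 < pvMarkers.length then some best.1
    else PySem.List.pyGet? (PySem.List.sorted files (fun x => x) false) 0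

-- ===== PRECONDITION & SPEC =====
def Spec_select_preferred_gguf_filename_py (files : List String) (out : Option String) : Prop := out = select_preferred_gguf_filename_py_alt files
instance (files : List String) (out : Option String) : Decidable (Spec_select_preferred_gguf_filename_py files out) := by unfold Spec_select_preferred_gguf_filename_py; infer_instance

-- ===== CLAIM (what is proved, stated in full; the proofs are below) =====
def Claim_equal_select_preferred_gguf_filename_py : Prop := ∀ (files : List String), Dom_select_preferred_gguf_filename_py files → Spec_select_preferred_gguf_filename_py files (select_preferred_gguf_filename_py files)

-- ===== LEMMAS AND PROOFS =====

-- the single-pass step over (original, lowered) pairs, parametric in the marker list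
def pvStep (ms : List String) (acc : String × Nat) (p : String × String) : String × Nat :=
  let r := ms.findIdx (fun m => PySem.Str.isIn m p.2)
  if r < acc.2 then (p.1, r) else acc

theorem pvFoldZero (ms : List String) (l : List (String × String)) (a : String × Nat)
    (ha : a.2 = 0) : l.foldl (pvStep ms) a = a := by
  induction l generalizing a with
  | nil => rfl
  | cons x xs ih =>
    simp only [List.foldl_cons, pvStep]
    rw [if_neg (by omega)]
    exact ih a ha

theorem pvFoldFirstZero (ms' : List String) (m : String) (l : List (String × String))
    (a : String × Nat) (q : String × String)
    (hq : l.find? (fun p => PySem.Str.isIn m p.2) = some q) (ha : 0 < a.2) :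
    l.foldl (pvStep (m :: ms')) a = (q.1, 0) := by
  induction l generalizing a with
  | nil => simp at hq
  | cons x xs ih =>
    rw [List.find?_cons] at hq
    by_cases hx : PySem.Str.isIn m x.2 = true
    · simp only [hx] at hq
      injection hq with hq; subst hq
      simp only [List.foldl_cons, pvStep, List.findIdx_cons, hx, cond_true]
      rw [if_pos ha]
      exact pvFoldZero _ _ _ rfl
    · simp only [hx] at hq
      simp only [List.foldl_cons, pvStep, List.findIdx_cons, hx, cond_false]
      split
      · exact ih _ hq (by omega)
      · exact ih _ hq ha

theorem pvFoldShift (ms' : List String) (m : String) (l : List (String × String))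
    (a : String × Nat) (hnone : ∀ p ∈ l, ¬ PySem.Str.isIn m p.2 = true) :
    l.foldl (pvStep (m :: ms')) (a.1, a.2 + 1)
      = ((l.foldl (pvStep ms') a).1, (l.foldl (pvStep ms') a).2 + 1) := by
  induction l generalizing a with
  | nil => rfl
  | cons x xs ih =>
    have hx : PySem.Str.isIn m x.2 = false := by
      have := hnone x (List.mem_cons_self)
      simpa using this
    have hrest : ∀ p ∈ xs, ¬ PySem.Str.isIn m p.2 = true :=
      fun p hp => hnone p (List.mem_cons_of_mem _ hp)
    simp only [List.foldl_cons, pvStep, List.findIdx_cons, hx, cond_false]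
    by_cases hlt : ms'.findIdx (fun mm => PySem.Str.isIn mm x.2) < a.2
    · rw [if_pos (by omega), if_pos hlt]
      exact ih (x.1, _) hrest
    · rw [if_neg (by omega), if_neg hlt]
      exact ih a hrest

theorem pvMain (ms : List String) (p : String × String) (rest : List (String × String)) :
    pvAOuter ms (p :: rest)
      = (let b := rest.foldl (pvStep ms)
           (p.1, ms.findIdx (fun m => PySem.Str.isIn m p.2));
         if b.2 < ms.length then some b.1 else none) := by
  induction ms with
  | nil => simp [pvAOuter]
  | cons m ms' ih =>
    simp only [pvAOuter, List.find?_cons]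
    by_cases hp : PySem.Str.isIn m p.2 = true
    · simp only [hp]
      rw [List.findIdx_cons]
      simp only [hp, cond_true]
      rw [pvFoldZero _ _ _ rfl]
      simp
    · simp only [hp]
      have hpf : PySem.Str.isIn m p.2 = false := by simpa using hp
      rw [List.findIdx_cons]
      simp only [hpf, cond_false]
      cases hq : rest.find? (fun q => PySem.Str.isIn m q.2) with
      | some q =>
        rw [pvFoldFirstZero ms' m rest _ q hq (by omega)]
        simp
      | none =>
        simp only [ih]
        have hnone : ∀ x ∈ rest, ¬ PySem.Str.isIn m x.2 = true :=
          List.find?_eq_none.mp hq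
        rw [pvFoldShift ms' m rest (p.1, ms'.findIdx fun mm => PySem.Str.isIn mm p.2) hnone]
        simp only [List.length_cons]
        by_cases hb : (rest.foldl (pvStep ms') (p.1, ms'.findIdx fun mm => PySem.Str.isIn mm p.2)).2 < ms'.length
        · rw [if_pos (by omega), if_pos (by omega)]
        · rw [if_neg (by omega), if_neg (by omega)]

-- B's fold over names equals the pair fold over (name, lowered name)
theorem pvFoldMap (ms : List String) (rest : List String) (a : String × Nat) :
    (rest.map (fun f => (f, PySem.Str.lower f))).foldl (pvStep ms) a
      = rest.foldl
          (fun acc name =>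
            let r := ms.findIdx (fun m => PySem.Str.isIn m (PySem.Str.lower name))
            if r < acc.2 then (name, r) else acc) a := by
  rw [List.foldl_map]
  rfl

-- ===== VERDICT (by name: the statement is the Claim_ definition above) =====
theorem select_preferred_gguf_filename_py_spec : Claim_equal_select_preferred_gguf_filename_py := by
  intro files _
  unfold Spec_select_preferred_gguf_filename_py
  cases files with
  | nil => rfl
  | cons f0 rest =>
    simp only [select_preferred_gguf_filename_py, select_preferred_gguf_filename_py_alt,
      if_neg (List.cons_ne_nil f0 rest), List.map_cons]
    have hA := pvMain pvMarkers (f0, PySem.Str.lower f0) (rest.map (fun f => (f, PySem.Str.lower f)))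
    simp only [pvFoldMap] at hA
    rw [hA]
    simp only [pvRank]
    split_ifs with hc <;> rfl
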